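-- pv_equiv track=rewrite | github.com/stra1ghtarrow90/oldpowerof10 | app/export_truepb_results_sql.py | infer_age_group
-- ===== SOURCE A (Python) =====
-- from typing import Any, Iterable, Sequence
--
-- def infer_age_group(age: int | None, rows: Sequence[dict[str, Any]]) -> str | None:
--     if any(bool(row.get("is_u13")) for row in rows):
--         return "U13"
--     if any(bool(row.get("is_u15")) for row in rows):
--         return "U15"
--     if any(bool(row.get("is_u17")) for row in rows):
--         return "U17"
--     if any(bool(row.get("is_u20")) for row in rows):
--         return "U20"
--
--     if age is None:
--         return None
--     if age < 13:
--         return "U13"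
--     if age < 15:
--         return "U15"
--     if age < 17:
--         return "U17"
--     if age < 20:
--         return "U20"
--     if age < 23:
--         return "U23"
--     if age >= 35:
--         return "V35"
--     return "Senior"
-- ===== SOURCE B (Python) =====
-- FLAGS = (("is_u13", 0, "U13"), ("is_u15", 1, "U15"), ("is_u17", 2, "U17"), ("is_u20", 3, "U20"))
-- BOUNDS = ((13, "U13"), (15, "U15"), (17, "U17"), (20, "U20"), (23, "U23"))
--
-- def infer_age_group(age, rows):
--     best = None  # (priority, label) of the highest-priority flag seen so far
--     for row in rows:
--         for key, p, label in FLAGS: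
--             if row.get(key) and (best is None or p < best[0]):
--                 best = (p, label)
--     if best is not None:
--         return best[1]
--     if age is None:
--         return None
--     hit = next((label for limit, label in BOUNDS if age < limit), None)
--     if hit is not None:
--         return hit
--     return "V35" if age >= 35 else "Senior"
-- ===== Notes on version B (the rewrite author's own statement) =====
-- stated objective: alternative
-- what changed: Replaces A's four separate any()-scans over rows by a single pass that tracks the minimum flag priority (with its label), and replaces the numeric if-cascade by a threshold-table lookup.
import Mathlib
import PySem

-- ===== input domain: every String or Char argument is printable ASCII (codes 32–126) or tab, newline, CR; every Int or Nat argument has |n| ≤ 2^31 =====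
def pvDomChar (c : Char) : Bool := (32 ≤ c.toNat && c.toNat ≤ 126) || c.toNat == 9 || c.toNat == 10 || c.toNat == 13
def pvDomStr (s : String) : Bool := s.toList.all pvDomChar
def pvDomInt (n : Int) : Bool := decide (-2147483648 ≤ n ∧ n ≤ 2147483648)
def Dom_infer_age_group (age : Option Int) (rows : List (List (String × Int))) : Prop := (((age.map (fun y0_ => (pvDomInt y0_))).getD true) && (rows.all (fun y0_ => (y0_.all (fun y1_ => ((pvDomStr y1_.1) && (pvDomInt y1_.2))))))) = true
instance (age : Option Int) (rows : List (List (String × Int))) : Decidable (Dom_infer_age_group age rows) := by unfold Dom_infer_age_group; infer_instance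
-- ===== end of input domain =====

-- B does one pass over rows tracking the minimum flag priority instead of A's four any()-scans,
-- and looks the numeric age up in a threshold table instead of an if-cascade; return value only, same cost.

-- bool(row.get(k)): first-match lookup, missing key or 0 is falsy (shared by both ports)
def pvFlag (row : List (String × Int)) (k : String) : Bool :=
  match (PySem.Dict.mk row).get? k with
  | some v => v != 0
  | none => false

-- ===== PORT A =====
def infer_age_group (age : Option Int) (rows : List (List (String × Int))) : Option String :=
  if rows.any (fun row => pvFlag row "is_u13") then some "U13"
  else if rows.any (fun row => pvFlag row "is_u15") then some "U15"
  else if rows.any (fun row => pvFlag row "is_u17") then some "U17"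
  else if rows.any (fun row => pvFlag row "is_u20") then some "U20"
  else match age with
    | none => none
    | some a =>
      if a < 13 then some "U13"
      else if a < 15 then some "U15"
      else if a < 17 then some "U17"
      else if a < 20 then some "U20"
      else if a < 23 then some "U23"
      else if a ≥ 35 then some "V35"
      else some "Senior"

-- ===== PORT B =====
def pvFLAGS : List (String × Nat × String) :=
  [("is_u13", 0, "U13"), ("is_u15", 1, "U15"), ("is_u17", 2, "U17"), ("is_u20", 3, "U20")]

def pvBOUNDS : List (Int × String) :=
  [(13, "U13"), (15, "U15"), (17, "U17"), (20, "U20"), (23, "U23")]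

-- inner loop of B: fold the four flags of one row into the running best (priority, label)
def pvStep (best : Option (Nat × String)) (row : List (String × Int)) : Option (Nat × String) :=
  pvFLAGS.foldl
    (fun b f =>
      if pvFlag row f.1 && (match b with | none => true | some pb => decide (f.2.1 < pb.1))
      then some f.2 else b)
    best

def infer_age_group_alt (age : Option Int) (rows : List (List (String × Int))) : Option String :=
  match rows.foldl pvStep none with
  | some best => some best.2
  | none =>
    match age with
    | none => none
    | some a =>
      match pvBOUNDS.find? (fun lb => decide (a < lb.1)) with
      | some lb => some lb.2
      | none => if a ≥ 35 then some "V35" else some "Senior"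

-- ===== PRECONDITION & SPEC =====
def Spec_infer_age_group (age : Option Int) (rows : List (List (String × Int))) (out : Option String) : Prop := out = infer_age_group_alt age rows
instance (age : Option Int) (rows : List (List (String × Int))) (out : Option String) : Decidable (Spec_infer_age_group age rows out) := by unfold Spec_infer_age_group; infer_instance

-- ===== CLAIM (what is proved, stated in full; the proofs are below) =====
def Claim_equal_infer_age_group : Prop := ∀ (age : Option Int) (rows : List (List (String × Int))), Dom_infer_age_group age rows → Spec_infer_age_group age rows (infer_age_group age rows)

-- ===== LEMMAS AND PROOFS =====

-- left-biased minimum on (priority, label)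
def pvMinO : Option (Nat × String) → Option (Nat × String) → Option (Nat × String)
  | none, y => y
  | some a, none => some a
  | some a, some b => if b.1 < a.1 then some b else some a

-- the highest-priority flag of one row
def pvRowPrio (row : List (String × Int)) : Option (Nat × String) :=
  if pvFlag row "is_u13" then some (0, "U13")
  else if pvFlag row "is_u15" then some (1, "U15")
  else if pvFlag row "is_u17" then some (2, "U17")
  else if pvFlag row "is_u20" then some (3, "U20")
  else none

-- A's flag result as an option
def pvAFlag (rows : List (List (String × Int))) : Option (Nat × String) :=
  if rows.any (fun r => pvFlag r "is_u13") then some (0, "U13")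
  else if rows.any (fun r => pvFlag r "is_u15") then some (1, "U15")
  else if rows.any (fun r => pvFlag r "is_u17") then some (2, "U17")
  else if rows.any (fun r => pvFlag r "is_u20") then some (3, "U20")
  else none

lemma pvMinO_none_right (x : Option (Nat × String)) : pvMinO x none = x := by
  cases x <;> rfl

lemma pvStep_eq (b : Option (Nat × String)) (row : List (String × Int)) :
    pvStep b row = pvMinO b (pvRowPrio row) := by
  rcases b with _ | ⟨p, l⟩ <;>
    simp only [pvStep, pvFLAGS, List.foldl, pvRowPrio, pvMinO] <;>
    cases h13 : pvFlag row "is_u13" <;>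
    cases h15 : pvFlag row "is_u15" <;>
    cases h17 : pvFlag row "is_u17" <;>
    cases h20 : pvFlag row "is_u20" <;>
    simp_all <;> split_ifs <;> simp_all <;> omega

lemma pvMinO_assoc (x y z : Option (Nat × String)) :
    pvMinO (pvMinO x y) z = pvMinO x (pvMinO y z) := by
  rcases x with _ | x <;> rcases y with _ | y <;> rcases z with _ | z <;>
    simp only [pvMinO] <;> split_ifs <;> (try simp only [pvMinO]) <;>
    (try split_ifs) <;> first | rfl | omega

-- the cons-step of pvAFlag, stated over abstract booleans so it is decidable
lemma pvAFlag_cons_bool (f13 f15 f17 f20 a13 a15 a17 a20 : Bool) :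
    (if (f13 || a13) = true then some ((0 : Nat), "U13")
     else if (f15 || a15) = true then some ((1 : Nat), "U15")
     else if (f17 || a17) = true then some ((2 : Nat), "U17")
     else if (f20 || a20) = true then some ((3 : Nat), "U20")
     else none) =
    pvMinO
      (if f13 = true then some ((0 : Nat), "U13")
       else if f15 = true then some ((1 : Nat), "U15")
       else if f17 = true then some ((2 : Nat), "U17")
       else if f20 = true then some ((3 : Nat), "U20")
       else none)
      (if a13 = true then some ((0 : Nat), "U13")
       else if a15 = true then some ((1 : Nat), "U15")
       else if a17 = true then some ((2 : Nat), "U17")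
       else if a20 = true then some ((3 : Nat), "U20")
       else none) := by
  revert f13 f15 f17 f20 a13 a15 a17 a20
  decide

lemma pvAFlag_cons (r : List (String × Int)) (rows : List (List (String × Int))) :
    pvAFlag (r :: rows) = pvMinO (pvRowPrio r) (pvAFlag rows) := by
  simp only [pvAFlag, pvRowPrio, List.any_cons]
  exact pvAFlag_cons_bool _ _ _ _ _ _ _ _

lemma pvFold_eq (rows : List (List (String × Int))) (b : Option (Nat × String)) :
    rows.foldl pvStep b = pvMinO b (pvAFlag rows) := by
  induction rows generalizing b with
  | nil => simp [pvAFlag, pvMinO_none_right]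
  | cons r rows ih =>
    rw [List.foldl_cons, ih, pvStep_eq, pvAFlag_cons, pvMinO_assoc]

-- ===== VERDICT (by name: the statement is the Claim_ definition above) =====
theorem infer_age_group_spec : Claim_equal_infer_age_group := by
  intro age rows _
  show infer_age_group age rows = infer_age_group_alt age rows
  unfold infer_age_group infer_age_group_alt
  rw [pvFold_eq]
  simp only [pvMinO]
  unfold pvAFlag
  cases rows.any (fun r => pvFlag r "is_u13") <;>
  cases rows.any (fun r => pvFlag r "is_u15") <;>
  cases rows.any (fun r => pvFlag r "is_u17") <;>
  cases rows.any (fun r => pvFlag r "is_u20") <;>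
  simp only [if_true, if_false, Bool.false_eq_true] <;>
  try rfl
  rcases age with _ | a
  · rfl
  · simp only [pvBOUNDS]
    by_cases h1 : a < 13 <;> by_cases h2 : a < 15 <;> by_cases h3 : a < 17 <;>
      by_cases h4 : a < 20 <;> by_cases h5 : a < 23 <;> by_cases h6 : a ≥ 35 <;>
      first | omega | simp [List.find?, h1, h2, h3, h4, h5, h6]
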